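-- pv_equiv track=rewrite | github.com/MichaelMIL/NEO_M6_GPS | GPS/decoders.py | ubx_checksum
-- ===== SOURCE A (Python) =====
-- def ubx_checksum(ubx_command:list[int])->list[int]:
--     CK_A,CK_B = 0, 0
--     for i in range(len(ubx_command)):
--       CK_A = CK_A + ubx_command[i]
--       CK_B = CK_B + CK_A
--
--     # ensure unsigned byte range
--     CK_A = CK_A & 0xFF
--     CK_B = CK_B & 0xFF
--     return [CK_A,CK_B]
-- ===== SOURCE B (Python) =====
-- def ubx_checksum(ubx_command: list[int]) -> list[int]:
--     n = len(ubx_command)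
--     CK_A = sum(ubx_command)
--     CK_B = sum((n - i) * b for i, b in enumerate(ubx_command))
--     return [CK_A & 0xFF, CK_B & 0xFF]
-- ===== Notes on version B (the rewrite author's own statement) =====
-- stated objective: simpler
-- what changed: Replaces the single loop maintaining a running sum and a sum-of-running-sums with two direct sums: CK_A = sum(bytes) and CK_B as the closed-form positionally weighted sum sum((n-i)*b), masking once at the end as A does.
import Mathlib
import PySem

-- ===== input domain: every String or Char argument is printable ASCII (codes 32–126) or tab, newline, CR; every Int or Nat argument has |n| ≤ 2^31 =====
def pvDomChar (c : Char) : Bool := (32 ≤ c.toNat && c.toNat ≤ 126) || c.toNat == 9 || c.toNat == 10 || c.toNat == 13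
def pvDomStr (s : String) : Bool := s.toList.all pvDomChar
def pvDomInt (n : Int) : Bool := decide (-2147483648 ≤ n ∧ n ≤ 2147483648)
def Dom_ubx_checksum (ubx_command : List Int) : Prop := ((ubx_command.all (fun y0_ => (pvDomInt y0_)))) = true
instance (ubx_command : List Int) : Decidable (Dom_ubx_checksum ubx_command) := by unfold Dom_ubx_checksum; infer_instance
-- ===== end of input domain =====

-- B replaces A's loop (running sum + sum of running sums) by two direct sums, a plain sum
-- and a positionally weighted sum; objective: simpler.

-- ===== PORT A =====
def ubx_checksum (ubx_command : List Int) : List Int :=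
  let st := (PySem.List.pyRange 0 (PySem.List.len ubx_command) 1).foldl
      (fun (ck : Int × Int) i =>
        let ckA := ck.1 + PySem.List.pyGetD ubx_command i 0
        (ckA, ck.2 + ckA)) (0, 0)
  [PySem.Int.band st.1 255, PySem.Int.band st.2 255]

-- ===== PORT B =====
def ubx_checksum_alt (ubx_command : List Int) : List Int :=
  let n := PySem.List.len ubx_command
  let ckA := ubx_command.sum
  let ckB := ((PySem.List.enumerate ubx_command).map (fun p => (n - p.1) * p.2)).sum
  [PySem.Int.band ckA 255, PySem.Int.band ckB 255]

-- ===== PRECONDITION & SPEC =====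
def Spec_ubx_checksum (ubx_command : List Int) (out : List Int) : Prop := out = ubx_checksum_alt ubx_command
instance (ubx_command : List Int) (out : List Int) : Decidable (Spec_ubx_checksum ubx_command out) := by unfold Spec_ubx_checksum; infer_instance

-- ===== CLAIM (what is proved, stated in full; the proofs are below) =====
def Claim_equal_ubx_checksum : Prop := ∀ (ubx_command : List Int), Dom_ubx_checksum ubx_command → Spec_ubx_checksum ubx_command (ubx_checksum ubx_command)

-- ===== LEMMAS AND PROOFS =====

-- Loop invariant: A's fold computes the plain sum and the weighted sum.
theorem ubx_foldl_inv (l : List Int) : ∀ (a b s : Int),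
    l.foldl (fun (ck : Int × Int) x => (ck.1 + x, ck.2 + (ck.1 + x))) (a, b)
    = (a + l.sum,
       b + (l.length : Int) * a
         + ((PySem.List.enumerate l s).map (fun p => ((l.length : Int) + s - p.1) * p.2)).sum) := by
  induction l with
  | nil => simp
  | cons x xs ih =>
      intro a b s
      simp only [List.foldl_cons, List.sum_cons, List.length_cons,
        PySem.List.enumerate_cons, List.map_cons]
      rw [ih (a + x) (b + (a + x)) (s + 1)]
      have hmap : (fun p : Int × Int => ((xs.length : Int) + (s + 1) - p.1) * p.2)
          = (fun p : Int × Int => (((xs.length + 1 : Nat) : Int) + s - p.1) * p.2) := by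
        funext p; push_cast; ring
      rw [hmap]
      refine Prod.ext ?_ ?_
      · simp; ring
      · simp; ring

-- ===== VERDICT (by name: the statement is the Claim_ definition above) =====
theorem ubx_checksum_spec : Claim_equal_ubx_checksum := by
  intro l _
  unfold Spec_ubx_checksum ubx_checksum ubx_checksum_alt
  simp only [PySem.List.len]
  rw [PySem.List.foldl_pyRange_zero_pyGetD' l 0
    (fun (ck : Int × Int) x => (ck.1 + x, ck.2 + (ck.1 + x))) (0, 0)]
  rw [ubx_foldl_inv l 0 0 0]
  simp
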